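-- pv_equiv track=rewrite | github.com/richard38999/RSM-Backend | Utility.py | convertToCardNo
-- ===== SOURCE A (Python) =====
-- def convertToCardNo(maskedCardNo):
--     returnmessage = ''
--     for i in maskedCardNo:
--         if i == 'a' or i == 'b' or i == 'c' or i == 'd' or i == 'e':
--             returnmessage += '0'
--         elif i == 'f' or i == 'g' or i == 'h' or i == 'i' or i == 'j':
--             returnmessage += '1'
--         elif i == 'k' or i == 'l' or i == 'm' or i == 'n' or i == 'o':
--             returnmessage += '2'
--         elif i == 'p' or i == 'q' or i == 'r' or i == 's' or i == 't':
--             returnmessage += '3'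
--         elif i == 'u' or i == 'v' or i == 'w' or i == 'x' or i == 'y':
--             returnmessage += '4'
--         elif i == 'z' or i == 'A' or i == 'B' or i == 'C' or i == 'D':
--             returnmessage += '5'
--         elif i == 'E' or i == 'F' or i == 'G' or i == 'H' or i == 'I':
--             returnmessage += '6'
--         elif i == 'J' or i == 'K' or i == 'L' or i == 'M' or i == 'N':
--             returnmessage += '7'
--         elif i == 'O' or i == 'P' or i == 'Q' or i == 'R' or i == 'S':
--             returnmessage += '8'
--         elif i == 'T' or i == 'U' or i == 'V' or i == 'W' or i == 'X':
--             returnmessage += '9'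
--     return returnmessage
-- ===== SOURCE B (Python) =====
-- def convertToCardNo(maskedCardNo):
--     digits = []
--     for c in maskedCardNo:
--         if 'a' <= c <= 'z':
--             idx = ord(c) - ord('a')
--         elif 'A' <= c <= 'X':
--             idx = 26 + ord(c) - ord('A')
--         else:
--             continue
--         digits.append(str(idx // 5))
--     return ''.join(digits)
-- ===== Notes on version B (the rewrite author's own statement) =====
-- stated objective: idiomatic
-- what changed: Replaces the 10-way if/elif chain of 50 character equality tests with a closed-form arithmetic digit: the letters a..z,A..X are indexed 0..49 and the digit is index//5, computed from ord(c) with two range checks, collected and joined.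
import Mathlib
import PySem

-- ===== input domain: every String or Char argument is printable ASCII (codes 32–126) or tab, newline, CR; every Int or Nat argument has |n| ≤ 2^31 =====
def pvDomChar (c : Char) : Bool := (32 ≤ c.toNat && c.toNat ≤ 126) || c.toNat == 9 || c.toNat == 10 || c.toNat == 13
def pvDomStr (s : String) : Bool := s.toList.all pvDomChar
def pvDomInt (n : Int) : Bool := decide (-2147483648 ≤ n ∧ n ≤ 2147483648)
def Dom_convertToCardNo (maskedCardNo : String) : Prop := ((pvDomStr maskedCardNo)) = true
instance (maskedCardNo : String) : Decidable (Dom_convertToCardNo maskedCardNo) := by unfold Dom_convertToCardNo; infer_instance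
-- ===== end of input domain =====

-- B replaces A's 10-way if/elif chain of 50 character equality tests by a closed-form
-- arithmetic digit (letters a..z,A..X indexed 0..49, digit = index // 5); same O(n) cost.


-- ===== PORT A =====
-- A's loop body: the 10-way if/elif chain, appending to the accumulator string.
def aStep (acc : String) (i : Char) : String :=
  if i = 'a' ∨ i = 'b' ∨ i = 'c' ∨ i = 'd' ∨ i = 'e' then acc ++ "0"
  else if i = 'f' ∨ i = 'g' ∨ i = 'h' ∨ i = 'i' ∨ i = 'j' then acc ++ "1"
  else if i = 'k' ∨ i = 'l' ∨ i = 'm' ∨ i = 'n' ∨ i = 'o' then acc ++ "2"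
  else if i = 'p' ∨ i = 'q' ∨ i = 'r' ∨ i = 's' ∨ i = 't' then acc ++ "3"
  else if i = 'u' ∨ i = 'v' ∨ i = 'w' ∨ i = 'x' ∨ i = 'y' then acc ++ "4"
  else if i = 'z' ∨ i = 'A' ∨ i = 'B' ∨ i = 'C' ∨ i = 'D' then acc ++ "5"
  else if i = 'E' ∨ i = 'F' ∨ i = 'G' ∨ i = 'H' ∨ i = 'I' then acc ++ "6"
  else if i = 'J' ∨ i = 'K' ∨ i = 'L' ∨ i = 'M' ∨ i = 'N' then acc ++ "7"
  else if i = 'O' ∨ i = 'P' ∨ i = 'Q' ∨ i = 'R' ∨ i = 'S' then acc ++ "8"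
  else if i = 'T' ∨ i = 'U' ∨ i = 'V' ∨ i = 'W' ∨ i = 'X' then acc ++ "9"
  else acc

def convertToCardNo (maskedCardNo : String) : String :=
  maskedCardNo.toList.foldl aStep ""

-- ===== PORT B =====
-- B's loop body: the closed-form digit, or none for the 'continue' branch.
def bDigit (c : Char) : Option String :=
  if 'a' ≤ c ∧ c ≤ 'z' then
    some (PySem.Int.toStr (PySem.Int.floordiv ((c.toNat : Int) - ('a'.toNat : Int)) 5))
  else if 'A' ≤ c ∧ c ≤ 'X' then
    some (PySem.Int.toStr (PySem.Int.floordiv (26 + (c.toNat : Int) - ('A'.toNat : Int)) 5))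
  else none

def convertToCardNo_alt (maskedCardNo : String) : String :=
  String.join (maskedCardNo.toList.foldl
    (fun ds c => match bDigit c with
      | some d => ds ++ [d]
      | none => ds) [])

-- ===== PRECONDITION & SPEC =====
def Spec_convertToCardNo (maskedCardNo : String) (out : String) : Prop := out = convertToCardNo_alt maskedCardNo
instance (maskedCardNo : String) (out : String) : Decidable (Spec_convertToCardNo maskedCardNo out) := by unfold Spec_convertToCardNo; infer_instance

-- ===== CLAIM (what is proved, stated in full; the proofs are below) =====
def Claim_equal_convertToCardNo : Prop := ∀ (maskedCardNo : String), Dom_convertToCardNo maskedCardNo → Spec_convertToCardNo maskedCardNo (convertToCardNo maskedCardNo)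

-- ===== LEMMAS AND PROOFS =====

-- A's step only appends to the accumulator.
set_option maxHeartbeats 1000000 in
theorem aStep_acc (acc : String) (c : Char) : aStep acc c = acc ++ aStep "" c := by
  unfold aStep; split_ifs <;> simp

-- per-character agreement, on ASCII codepoints, checked by the kernel
theorem key_fin : ∀ n : Fin 128,
    aStep "" (Char.ofNat n.val) = (bDigit (Char.ofNat n.val)).getD "" := by decide

theorem key (c : Char) (h : c.toNat < 128) : aStep "" c = (bDigit c).getD "" := by
  have := key_fin ⟨c.toNat, h⟩
  simpa using this

theorem bfold (l : List Char) (ds : List String) :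
    l.foldl (fun ds c => match bDigit c with
      | some d => ds ++ [d]
      | none => ds) ds = ds ++ l.filterMap bDigit := by
  induction l generalizing ds with
  | nil => simp
  | cons c l ih =>
    cases hb : bDigit c <;> simp [List.foldl_cons, hb, ih]

theorem join_cons (a : String) (L : List String) :
    String.join (a :: L) = a ++ String.join L := by
  simp [String.join]
  induction L generalizing a with
  | nil => simp
  | cons b L ih => simp [List.foldl_cons, ih (a ++ b), ih b, String.append_assoc]

theorem afold (l : List Char) (acc : String) (h : ∀ c ∈ l, c.toNat < 128) :
    l.foldl aStep acc = acc ++ String.join (l.filterMap bDigit) := by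
  induction l generalizing acc with
  | nil => simp [String.join]
  | cons c l ih =>
    have hc := key c (h c (by simp))
    have hrest : ∀ x ∈ l, x.toNat < 128 := fun x hx => h x (by simp [hx])
    rw [List.foldl_cons, aStep_acc, ih _ hrest, hc]
    cases hb : bDigit c <;>
      simp [hb, join_cons, String.append_assoc]

theorem convertToCardNo_spec : Claim_equal_convertToCardNo := by
  intro s hdom
  unfold Spec_convertToCardNo convertToCardNo convertToCardNo_alt
  have h : ∀ c ∈ s.toList, c.toNat < 128 := by
    intro c hc
    have := List.all_eq_true.mp hdom c hc
    simp only [pvDomChar, Bool.or_eq_true, Bool.and_eq_true, decide_eq_true_eq,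
      beq_iff_eq] at this
    omega
  rw [afold _ _ h, bfold]
  simp
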